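-- pv_equiv track=rewrite | github.com/sebastian-griego/BEqCritic | scripts/generate_results.py | _pairwise_wins
-- ===== SOURCE A (Python) =====
-- def _pairwise_wins(a: dict[str, bool], b: dict[str, bool]) -> tuple[int, int, int, int]:
--     ids = sorted(set(a.keys()) & set(b.keys()))
--     win = lose = tie = 0
--     for pid in ids:
--         ca = bool(a[pid])
--         cb = bool(b[pid])
--         if ca and not cb:
--             win += 1
--         elif cb and not ca:
--             lose += 1
--         else:
--             tie += 1
--     return win, lose, tie, len(ids)
-- ===== SOURCE B (Python) =====
-- def _pairwise_wins(a: dict[str, bool], b: dict[str, bool]) -> tuple[int, int, int, int]: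
--     shared = set(a) & set(b)
--     a_true = {pid for pid in shared if bool(a[pid])}
--     b_true = {pid for pid in shared if bool(b[pid])}
--     win = len(a_true - b_true)
--     lose = len(b_true - a_true)
--     tie = len(shared) - win - lose
--     return win, lose, tie, len(shared)
-- ===== Notes on version B (the rewrite author's own statement) =====
-- stated objective: simpler
-- what changed: Replaces the sorted-ids loop with a three-way branch by set algebra: win/lose are cardinalities of the set differences of the true-sets over the shared keys, and tie is derived by subtraction, with no sort and no per-key branching.
import Mathlib
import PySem

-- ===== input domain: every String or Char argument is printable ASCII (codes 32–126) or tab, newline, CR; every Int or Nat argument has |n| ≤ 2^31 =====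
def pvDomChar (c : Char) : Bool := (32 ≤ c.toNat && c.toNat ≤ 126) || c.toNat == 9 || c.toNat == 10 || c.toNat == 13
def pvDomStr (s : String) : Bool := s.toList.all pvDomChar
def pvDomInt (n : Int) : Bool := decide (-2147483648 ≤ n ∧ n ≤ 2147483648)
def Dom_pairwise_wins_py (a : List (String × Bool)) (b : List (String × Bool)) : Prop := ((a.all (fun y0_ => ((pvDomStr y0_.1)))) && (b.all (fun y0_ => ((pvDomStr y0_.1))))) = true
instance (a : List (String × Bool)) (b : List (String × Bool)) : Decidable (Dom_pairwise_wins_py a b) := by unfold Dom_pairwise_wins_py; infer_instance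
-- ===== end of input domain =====

-- B replaces the sorted-ids win/lose/tie branch loop by set algebra: win/lose as cardinalities
-- of set differences of the true-sets over the shared keys, tie by subtraction (objective: simpler).


-- ===== PORT A =====
-- the for-loop over ids, accumulating (win, lose, tie)
def pwLoopA (da db : PySem.Dict String Bool) (ids : List String) (acc : Int × Int × Int) :
    Int × Int × Int :=
  ids.foldl (fun s pid =>
    let ca := da.getD pid false   -- a[pid]; pid is a shared key, so present
    let cb := db.getD pid false   -- b[pid]
    if ca && !cb then (s.1 + 1, s.2.1, s.2.2)
    else if cb && !ca then (s.1, s.2.1 + 1, s.2.2)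
    else (s.1, s.2.1, s.2.2 + 1)) acc

def pairwise_wins_py (a : List (String × Bool)) (b : List (String × Bool)) : Int × Int × Int × Int :=
  let da := PySem.Dict.ofList a
  let db := PySem.Dict.ofList b
  let ids := PySem.List.sorted (PySem.Set.inter (PySem.Set.ofList da.keys) (PySem.Set.ofList db.keys)) (fun x => x) false
  let wlt := pwLoopA da db ids (0, 0, 0)
  (wlt.1, wlt.2.1, wlt.2.2, (ids.length : Int))

-- ===== PORT B =====
def pairwise_wins_py_alt (a : List (String × Bool)) (b : List (String × Bool)) : Int × Int × Int × Int :=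
  let da := PySem.Dict.ofList a
  let db := PySem.Dict.ofList b
  let shared := PySem.Set.inter (PySem.Set.ofList da.keys) (PySem.Set.ofList db.keys)
  let aTrue : PySem.Set String := shared.filter (fun pid => da.getD pid false)
  let bTrue : PySem.Set String := shared.filter (fun pid => db.getD pid false)
  let win : Int := (PySem.Set.diff aTrue bTrue).length
  let lose : Int := (PySem.Set.diff bTrue aTrue).length
  let tie : Int := (shared.length : Int) - win - lose
  (win, lose, tie, (shared.length : Int))

-- ===== PRECONDITION & SPEC =====
def Spec_pairwise_wins_py (a : List (String × Bool)) (b : List (String × Bool)) (out : Int × Int × Int × Int) : Prop := out = pairwise_wins_py_alt a b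
instance (a : List (String × Bool)) (b : List (String × Bool)) (out : Int × Int × Int × Int) : Decidable (Spec_pairwise_wins_py a b out) := by unfold Spec_pairwise_wins_py; infer_instance

-- ===== CLAIM (what is proved, stated in full; the proofs are below) =====
def Claim_equal_pairwise_wins_py : Prop := ∀ (a : List (String × Bool)) (b : List (String × Bool)), Dom_pairwise_wins_py a b → Spec_pairwise_wins_py a b (pairwise_wins_py a b)

-- ===== LEMMAS AND PROOFS =====

-- A's loop computes the three counts of its branch predicates over the id list
theorem pwLoopA_counts (da db : PySem.Dict String Bool) (ids : List String)
    (w x y : Int) :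
    pwLoopA da db ids (w, x, y) =
      (w + (ids.countP (fun pid => da.getD pid false && !db.getD pid false) : Int),
       x + (ids.countP (fun pid => db.getD pid false && !da.getD pid false) : Int),
       y + ((ids.length : Int)
            - (ids.countP (fun pid => da.getD pid false && !db.getD pid false) : Int)
            - (ids.countP (fun pid => db.getD pid false && !da.getD pid false) : Int))) := by
  induction ids generalizing w x y with
  | nil => simp [pwLoopA]
  | cons h t ih =>
    simp only [pwLoopA, List.foldl_cons] at *
    rcases ha : da.getD h false <;> rcases hb : db.getD h false <;>
      simp only [ha, hb, Bool.not_true, Bool.not_false, Bool.and_true, Bool.and_false,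
        if_true, List.countP_cons, List.length_cons] <;>
      rw [ih] <;> simp [Prod.ext_iff] <;> omega

-- B's set difference of the two filtered true-sets is a single filter with the conjoined predicate
theorem diff_filter_filter (s : List String) (p q : String → Bool) :
    PySem.Set.diff (s.filter p) (s.filter q) = s.filter (fun x => p x && !q x) := by
  simp only [PySem.Set.diff, PySem.Set.contains, List.filter_filter]
  apply List.filter_congr
  intro x hx
  by_cases hq : q x = true <;>
    simp [List.mem_filter, hx, hq]

-- ===== VERDICT (by name: the statement is the Claim_ definition above) =====
theorem pairwise_wins_py_spec : Claim_equal_pairwise_wins_py := by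
  intro a b _
  show pairwise_wins_py a b = pairwise_wins_py_alt a b
  simp only [pairwise_wins_py, pairwise_wins_py_alt]
  have hperm := PySem.List.sorted_perm
    (PySem.Set.inter (PySem.Set.ofList (PySem.Dict.ofList a).keys)
      (PySem.Set.ofList (PySem.Dict.ofList b).keys)) (fun x => x) false
  rw [pwLoopA_counts, diff_filter_filter, diff_filter_filter]
  simp only [List.countP_eq_length_filter, (hperm.filter _).length_eq, hperm.length_eq]
  simp
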